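-- pv_equiv track=rewrite | github.com/max38744/CodingMaster | 03_Advanced/8744. 잭과 마법의 나무_푸는 중.py | bfs_to_reach_height
-- ===== SOURCE A (Python) =====
-- class TreeNode:
--     def __init__(self, height, day):
--         self.height = height
--         self.day = day
--         self.children = []
--
-- def bfs_to_reach_height(N):
--     from collections import deque
--
--     root = TreeNode(1, 0)
--     queue = deque([root])
--
--     visited = {1}
--
--     while queue:
--         node = queue.popleft()
--         current_height = node.height
--         current_day = node.day
--
--         if current_height == N:
--             return current_day
--
--         sunny_height = current_height + current_height
--         cloudy_height = max(1, current_height - 1)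
--         stormy_height = (current_height + current_height) // 2
--
--         for new_height in [sunny_height, cloudy_height, stormy_height]:
--             if new_height not in visited:
--                 visited.add(new_height)
--                 new_node = TreeNode(new_height, current_day + 1)
--                 node.children.append(new_node)
--                 queue.append(new_node)
-- ===== SOURCE B (Python) =====
-- def bfs_to_reach_height(N):
--     # Reverse greedy: shrink N back to 1 (halve when even, else round up to the
--     # next even number and halve, which costs two days), counting days.
--     days = 0
--     n = N
--     while n > 1:
--         if n % 2 == 0:
--             n //= 2
--             days += 1
--         else:
--             n += 1
--             n //= 2
--             days += 2
--     return days
-- ===== Notes on version B (the rewrite author's own statement) =====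
-- stated objective: faster
-- what changed: Replaces the forward breadth-first search over TreeNodes (queue + visited set, exponentially many nodes per level) by a reverse greedy loop that shrinks N to 1, halving when even and incrementing-then-halving when odd, counting days.
-- outside the precondition, e.g. on bfs_to_reach_height(0): A does not finish within the time limit, B returns 0; on bfs_to_reach_height(-3): A does not finish within the time limit, B returns 0
import Mathlib
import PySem

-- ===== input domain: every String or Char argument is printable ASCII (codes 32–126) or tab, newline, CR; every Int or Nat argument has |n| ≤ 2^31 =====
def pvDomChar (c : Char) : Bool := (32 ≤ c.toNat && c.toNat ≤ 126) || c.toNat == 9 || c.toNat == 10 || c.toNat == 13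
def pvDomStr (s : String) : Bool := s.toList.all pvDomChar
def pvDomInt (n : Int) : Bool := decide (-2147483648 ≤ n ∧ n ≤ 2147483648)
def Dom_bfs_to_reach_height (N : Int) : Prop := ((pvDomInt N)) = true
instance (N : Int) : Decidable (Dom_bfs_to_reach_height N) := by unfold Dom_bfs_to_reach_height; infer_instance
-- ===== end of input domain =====

-- B replaces A's forward breadth-first search by a reverse greedy descent from N
-- (halve when even, round up then halve when odd), which is asymptotically faster.

-- ===== PORT A =====
-- A TreeNode carries (height, day); its 'children' list is only written, never
-- read, by bfs_to_reach_height, so nodes are ported as (height, day) pairs.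
-- 'collections.deque' is ported as the standard two-list functional queue
-- (front list, reversed back list) and Python's 'set' as Std.HashSet; both are
-- exact for the operations A performs (popleft, append, 'in', add).
def pvPopleft (q : List (Int × Int) × List (Int × Int)) :
    Option ((Int × Int) × (List (Int × Int) × List (Int × Int))) :=
  match q.1 with
  | x :: f => some (x, (f, q.2))
  | [] =>
    match q.2.reverse with
    | [] => none
    | x :: f => some (x, (f, []))

def pvAppend (q : List (Int × Int) × List (Int × Int)) (x : Int × Int) :
    List (Int × Int) × List (Int × Int) := (q.1, x :: q.2)

-- 'if new_height not in visited: visited.add(...); queue.append(...)':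
def pvPushNew (day : Int)
    (st : (List (Int × Int) × List (Int × Int)) × Std.HashSet Int) (nh : Int) :
    (List (Int × Int) × List (Int × Int)) × Std.HashSet Int :=
  if st.2.contains nh then st else (pvAppend st.1 (nh, day), st.2.insert nh)

-- the 'while queue:' loop; the fuel only makes the recursion total (the proofs
-- below show it is never exhausted when 1 ≤ N); 0 stands for Python's
-- falling off the loop (None), which never happens when 1 ≤ N
def pvLoopA (N : Int) :
    Nat → (List (Int × Int) × List (Int × Int)) → Std.HashSet Int → Int
  | 0, _, _ => 0
  | fuel + 1, q, visited =>
    match pvPopleft q with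
    | none => 0
    | some ((h, d), rest) =>
      if h = N then d
      else
        let sunny := h + h
        let cloudy := max 1 (h - 1)
        let stormy := PySem.Int.floordiv (h + h) 2
        let st := [sunny, cloudy, stormy].foldl (pvPushNew (d + 1)) (rest, visited)
        pvLoopA N fuel st.1 st.2

def bfs_to_reach_height (N : Int) : Int :=
  pvLoopA N (2 ^ (2 * Nat.log 2 (N.toNat + 1) + 4)) ([((1 : Int), (0 : Int))], [])
    ((∅ : Std.HashSet Int).insert 1)

-- ===== PORT B =====
-- 'while n > 1:' of Source B
def pvLoopB (n : Int) (days : Int) : Int :=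
  if h1 : 1 < n then
    if PySem.Int.mod n 2 = 0 then pvLoopB (PySem.Int.floordiv n 2) (days + 1)
    else pvLoopB (PySem.Int.floordiv (n + 1) 2) (days + 2)
  else days
termination_by n.toNat
decreasing_by
  · rw [PySem.Int.floordiv_eq_ediv_of_pos (by norm_num)]
    omega
  · rw [PySem.Int.floordiv_eq_ediv_of_pos (by norm_num)]
    rename_i hmod
    rw [PySem.Int.mod_eq_emod_of_pos (by norm_num)] at hmod
    omega

def bfs_to_reach_height_alt (N : Int) : Int := pvLoopB N 0

-- ===== PRECONDITION & SPEC =====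
-- For N ≤ 0 the BFS never reaches N (heights stay ≥ 1) and A loops forever
-- (returns nothing), so Pre_ admits exactly the inputs on which A returns.
def Pre_bfs_to_reach_height (N : Int) : Prop := 1 ≤ N
instance (N : Int) : Decidable (Pre_bfs_to_reach_height N) := by
  unfold Pre_bfs_to_reach_height; infer_instance

def pvWitness_bfs_to_reach_height : Int := 7

def Spec_bfs_to_reach_height (N : Int) (out : Int) : Prop := out = bfs_to_reach_height_alt N
instance (N : Int) (out : Int) : Decidable (Spec_bfs_to_reach_height N out) := by unfold Spec_bfs_to_reach_height; infer_instance

-- ===== CLAIM (what is proved, stated in full; the proofs are below) =====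
def Claim_equal_bfs_to_reach_height : Prop := ∀ (N : Int), Dom_bfs_to_reach_height N → Pre_bfs_to_reach_height N → Spec_bfs_to_reach_height N (bfs_to_reach_height N)

-- ===== LEMMAS AND PROOFS =====

-- fN n = number of days to grow a tree from height 1 to height n (greedy count)
def fN (n : Nat) : Nat :=
  if n ≤ 1 then 0
  else if n % 2 = 0 then 1 + fN (n / 2)
  else 2 + fN ((n + 1) / 2)
termination_by n
decreasing_by all_goals omega

lemma fN_of_le (n : Nat) (h : n ≤ 1) : fN n = 0 := by
  rw [fN]; simp [h]

lemma fN_even (n : Nat) (h2 : 2 ≤ n) (he : n % 2 = 0) : fN n = 1 + fN (n / 2) := by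
  rw [fN]; simp only [if_neg (by omega : ¬ n ≤ 1), if_pos he]

lemma fN_odd (n : Nat) (h2 : 2 ≤ n) (ho : n % 2 = 1) : fN n = 2 + fN ((n + 1) / 2) := by
  rw [fN]; simp only [if_neg (by omega : ¬ n ≤ 1), if_neg (by omega : ¬ n % 2 = 0)]

lemma fN_eq_zero_iff (n : Nat) : fN n = 0 ↔ n ≤ 1 := by
  constructor
  · intro h
    by_contra hn
    by_cases he : n % 2 = 0
    · rw [fN_even n (by omega) he] at h; omega
    · rw [fN_odd n (by omega) (by omega)] at h; omega
  · exact fN_of_le n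

lemma fN_double (n : Nat) (h : 1 ≤ n) : fN (2 * n) = fN n + 1 := by
  rw [fN_even (2 * n) (by omega) (by omega)]
  have : 2 * n / 2 = n := by omega
  rw [this]; omega

lemma fN_odd_succ (n : Nat) (h2 : 2 ≤ n) (ho : n % 2 = 1) : fN n = fN (n + 1) + 1 := by
  rw [fN_odd n h2 ho, fN_even (n + 1) (by omega) (by omega)]
  have hq : (n + 1) / 2 = (n + 1) / 2 := rfl
  omega

lemma fN_eq_one_iff (n : Nat) : fN n = 1 ↔ n = 2 := by
  constructor
  · intro h
    have h2 : 2 ≤ n := by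
      by_contra hn
      rw [fN_of_le n (by omega)] at h; omega
    by_cases he : n % 2 = 0
    · rw [fN_even n h2 he] at h
      have h0 : fN (n / 2) = 0 := by omega
      rw [fN_eq_zero_iff] at h0
      omega
    · rw [fN_odd n h2 (by omega)] at h; omega
  · intro h; subst h
    rw [fN_even 2 (by norm_num) (by norm_num)]
    norm_num [fN_of_le]

-- greedy count increases by at most 1 from n to n+1
lemma fN_le_succ (n : Nat) (h : 1 ≤ n) : fN n ≤ fN (n + 1) + 1 := by
  induction n using Nat.strong_induction_on with
  | _ n ih =>
    rcases Nat.lt_or_ge n 2 with h2 | h2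
    · have hn : n = 1 := by omega
      subst hn
      simp [fN_of_le 1 (by norm_num)]
    · by_cases he : n % 2 = 0
      · rw [fN_even n h2 he, fN_odd (n + 1) (by omega) (by omega)]
        have hq : (n + 1 + 1) / 2 = n / 2 + 1 := by omega
        rw [hq]
        have := ih (n / 2) (by omega) (by omega)
        omega
      · rw [fN_odd_succ n h2 (by omega)]

lemma fN_le_pow (n : Nat) (h : 1 ≤ n) : n ≤ 2 ^ fN n := by
  induction n using Nat.strong_induction_on with
  | _ n ih =>
    rcases Nat.lt_or_ge n 2 with h2 | h2
    · interval_cases n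
      simp [fN_of_le]
    · by_cases he : n % 2 = 0
      · rw [fN_even n h2 he]
        have := ih (n / 2) (by omega) (by omega)
        calc n = 2 * (n / 2) := by omega
        _ ≤ 2 * 2 ^ fN (n / 2) := by omega
        _ = 2 ^ (1 + fN (n / 2)) := by rw [pow_add]; ring
      · rw [fN_odd n h2 (by omega)]
        have := ih ((n + 1) / 2) (by omega) (by omega)
        have hp : 2 ^ (1 + fN ((n + 1) / 2)) ≤ 2 ^ (2 + fN ((n + 1) / 2)) :=
          Nat.pow_le_pow_right (by norm_num) (by omega)
        have : n + 1 ≤ 2 ^ (1 + fN ((n + 1) / 2)) := by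
          calc n + 1 = 2 * ((n + 1) / 2) := by omega
          _ ≤ 2 * 2 ^ fN ((n + 1) / 2) := by omega
          _ = 2 ^ (1 + fN ((n + 1) / 2)) := by rw [pow_add]; ring
        omega

lemma fN_pow (l : Nat) : fN (2 ^ l) = l := by
  induction l with
  | zero => simp [fN_of_le]
  | succ l ih =>
    have : 2 ^ (l + 1) = 2 * 2 ^ l := by ring
    rw [this, fN_double (2 ^ l) (Nat.one_le_two_pow), ih]

lemma fN_le_log (n : Nat) (h : 1 ≤ n) : fN n ≤ 2 * Nat.log 2 n + 2 := by
  induction n using Nat.strong_induction_on with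
  | _ n ih =>
    rcases Nat.lt_or_ge n 2 with h2 | h2
    · have hn : n = 1 := by omega
      subst hn; simp [fN_of_le]
    · have hlog1 : 1 ≤ Nat.log 2 n := Nat.log_pos (by norm_num) h2
      by_cases he : n % 2 = 0
      · rw [fN_even n h2 he]
        have hdiv : Nat.log 2 (n / 2) = Nat.log 2 n - 1 := Nat.log_div_base 2 n
        have := ih (n / 2) (by omega) (by omega)
        omega
      · have ho : n % 2 = 1 := by omega
        have h3 : 3 ≤ n := by omega
        rw [fN_odd n h2 ho]
        set l := Nat.log 2 n with hl
        have hub : n < 2 ^ (l + 1) := Nat.lt_pow_succ_log_self (by norm_num) n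
        have hm : (n + 1) / 2 ≤ 2 ^ l := by omega
        rcases eq_or_lt_of_le hm with heq | hlt
        · rw [heq, fN_pow]; omega
        · have hm2 : 2 ≤ (n + 1) / 2 := by omega
          have hlm : Nat.log 2 ((n + 1) / 2) < l := Nat.log_lt_of_lt_pow (by omega) hlt
          have := ih ((n + 1) / 2) (by omega) (by omega)
          omega

-- ---- Int-side bridge ----

-- proof-only canonical parent of a height in the BFS tree
def pvPar (h : Int) : Int := if h % 2 = 0 then h / 2 else h + 1

lemma pvPar_spec (h : Int) (h2 : 2 ≤ h) :
    1 ≤ pvPar h ∧ fN (pvPar h).toNat + 1 = fN h.toNat := by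
  unfold pvPar
  by_cases he : h % 2 = 0
  · rw [if_pos he]
    have h1 : 1 ≤ h / 2 := by omega
    have ht : h.toNat = 2 * (h / 2).toNat := by omega
    refine ⟨h1, ?_⟩
    rw [ht, fN_double (h / 2).toNat (by omega)]
  · rw [if_neg he]
    have ho : h % 2 = 1 := by omega
    have h3 : 3 ≤ h := by omega
    have hon : h.toNat % 2 = 1 := by omega
    have := fN_odd_succ h.toNat (by omega) hon
    have ht : (h + 1).toNat = h.toNat + 1 := by omega
    refine ⟨by omega, ?_⟩
    rw [ht]; omega

-- ---- the invariant of A's BFS loop ----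

structure PvInv (N : Int) (k : Nat) (A B : List Int) (V : Std.HashSet Int) : Prop where
  hA : ∀ a ∈ A, 1 ≤ a ∧ fN a.toNat = k
  hB : ∀ b ∈ B, 1 ≤ b ∧ fN b.toNat = k + 1
  hV : ∀ h : Int, h ∈ V ↔ (1 ≤ h ∧ fN h.toNat ≤ k) ∨ h ∈ B
  hP : ∀ h : Int, 1 ≤ h → fN h.toNat = k + 1 → h ∈ B ∨ pvPar h ∈ A
  nA : A.Nodup
  nB : B.Nodup
  hk : k ≤ fN N.toNat
  hN : k = fN N.toNat → N ∈ A

-- a Nodup list of heights of level j has at most 2^j elements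
lemma pv_level_card (j : Nat) (L : List Int) (nd : L.Nodup)
    (hL : ∀ b ∈ L, 1 ≤ b ∧ fN b.toNat = j) : L.length ≤ 2 ^ j := by
  have ndm : (L.map Int.toNat).Nodup := by
    refine nd.map_on ?_
    intro a ha b hb hab
    have h1 := (hL a ha).1
    have h2 := (hL b hb).1
    omega
  have hsub : (L.map Int.toNat).toFinset ⊆ Finset.Icc 1 (2 ^ j) := by
    intro x hx
    simp only [List.mem_toFinset, List.mem_map] at hx
    obtain ⟨b, hb, rfl⟩ := hx
    obtain ⟨hb1, hbj⟩ := hL b hb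
    have := fN_le_pow b.toNat (by omega)
    rw [hbj] at this
    simp only [Finset.mem_Icc]
    omega
  have hcard := Finset.card_le_card hsub
  rw [List.toFinset_card_of_nodup ndm, Nat.card_Icc] at hcard
  simpa using hcard

lemma pv_reindex (N : Int) (k : Nat) (B : List Int) (V : Std.HashSet Int)
    (inv : PvInv N k [] B V) : PvInv N (k + 1) B [] V ∧ B ≠ [] := by
  have hBfull : ∀ h : Int, 1 ≤ h → fN h.toNat = k + 1 → h ∈ B := by
    intro h h1 hf
    rcases inv.hP h h1 hf with hB | hA
    · exact hB
    · exact absurd hA (List.not_mem_nil)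
  have hklt : k < fN N.toNat := by
    rcases Nat.lt_or_ge k (fN N.toNat) with h | h
    · exact h
    · have hkeq : k = fN N.toNat := le_antisymm (inv.hk) h
      exact absurd (inv.hN hkeq) (List.not_mem_nil)
  refine ⟨⟨inv.hB, by simp, ?_, ?_, inv.nB, List.nodup_nil, by omega, ?_⟩, ?_⟩
  · intro h
    rw [inv.hV h]
    simp only [List.not_mem_nil, or_false]
    constructor
    · rintro (⟨h1, hle⟩ | hB)
      · exact ⟨h1, by omega⟩
      · obtain ⟨h1, hf⟩ := inv.hB h hB
        exact ⟨h1, by omega⟩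
    · rintro ⟨h1, hle⟩
      rcases Nat.lt_or_ge k (fN h.toNat) with hgt | hlek
      · exact Or.inr (hBfull h h1 (by omega))
      · exact Or.inl ⟨h1, hlek⟩
  · intro h h1 hf
    right
    have h2 : 2 ≤ h := by
      by_contra hc
      have h1' : h = 1 := by omega
      rw [h1'] at hf
      simp only [Int.toNat_one] at hf
      rw [fN_of_le 1 (by norm_num)] at hf
      omega
    obtain ⟨hp1, hps⟩ := pvPar_spec h h2
    exact hBfull (pvPar h) hp1 (by omega)
  · intro hkT
    have hN2 : 2 ≤ N.toNat := by
      by_contra hc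
      rw [fN_of_le N.toNat (by omega)] at hkT
      omega
    exact hBfull N (by omega) hkT.symm
  · have h1 : (1 : Int) ≤ ((2 ^ (k + 1) : Nat) : Int) := by
      exact_mod_cast Nat.one_le_two_pow
    have ht : (((2 ^ (k + 1) : Nat) : Int)).toNat = 2 ^ (k + 1) := by omega
    have hf : fN (((2 ^ (k + 1) : Nat) : Int)).toNat = k + 1 := by rw [ht, fN_pow]
    exact List.ne_nil_of_mem (hBfull _ h1 hf)

lemma pv_inv_step (N : Int) (k : Nat) (a : Int) (A B Δ : List Int)
    (V V' : Std.HashSet Int) (inv : PvInv N k (a :: A) B V) (hne : a ≠ N)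
    (hΔ : ∀ x ∈ Δ, 1 ≤ x ∧ fN x.toNat = k + 1 ∧ x ∉ B)
    (hΔnd : Δ.Nodup)
    (hV' : ∀ h : Int, h ∈ V' ↔ h ∈ V ∨ h ∈ Δ)
    (hcover : ∀ h : Int, 1 ≤ h → fN h.toNat = k + 1 → pvPar h = a → h ∈ B ∨ h ∈ Δ) :
    PvInv N k A (B ++ Δ) V' := by
  refine ⟨?_, ?_, ?_, ?_, ?_, ?_, inv.hk, ?_⟩
  · exact fun x hx => inv.hA x (List.mem_cons_of_mem a hx)
  · intro b hb
    rcases List.mem_append.mp hb with h | h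
    · exact inv.hB b h
    · exact ⟨(hΔ b h).1, (hΔ b h).2.1⟩
  · intro h
    rw [hV' h, inv.hV h, List.mem_append]
    tauto
  · intro h h1 hf
    rcases inv.hP h h1 hf with hB | hpar
    · exact Or.inl (List.mem_append.mpr (Or.inl hB))
    · rcases List.mem_cons.mp hpar with heq | hA
      · rcases hcover h h1 hf heq with hB | hΔm
        · exact Or.inl (List.mem_append.mpr (Or.inl hB))
        · exact Or.inl (List.mem_append.mpr (Or.inr hΔm))
      · exact Or.inr hA
  · exact (List.nodup_cons.mp inv.nA).2
  · refine inv.nB.append hΔnd ?_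
    intro x hxB hxΔ
    exact (hΔ x hxΔ).2.2 hxB
  · intro hkT
    rcases List.mem_cons.mp (inv.hN hkT) with heq | hA
    · exact absurd heq.symm hne
    · exact hA

def pvToList (q : List (Int × Int) × List (Int × Int)) : List (Int × Int) :=
  q.1 ++ q.2.reverse

lemma pvToList_append (q : List (Int × Int) × List (Int × Int)) (x : Int × Int) :
    pvToList (pvAppend q x) = pvToList q ++ [x] := by
  simp [pvToList, pvAppend]

lemma pvPopleft_cons (q : List (Int × Int) × List (Int × Int)) (x : Int × Int)
    (l : List (Int × Int)) (h : pvToList q = x :: l) :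
    ∃ q', pvPopleft q = some (x, q') ∧ pvToList q' = l := by
  obtain ⟨f, b⟩ := q
  cases f with
  | cons y f' =>
    simp only [pvToList, List.cons_append, List.cons.injEq] at h
    refine ⟨(f', b), ?_, ?_⟩
    · simp [pvPopleft, h.1]
    · simpa [pvToList] using h.2
  | nil =>
    simp only [pvToList, List.nil_append] at h
    refine ⟨(l, []), ?_, by simp [pvToList]⟩
    simp [pvPopleft, h]

lemma pvPushNew_mem (day : Int)
    (st : (List (Int × Int) × List (Int × Int)) × Std.HashSet Int) (nh : Int)
    (h : nh ∈ st.2) : pvPushNew day st nh = st := by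
  unfold pvPushNew
  rw [if_pos (Std.HashSet.contains_iff_mem.mpr h)]

lemma pvPushNew_not_mem (day : Int)
    (st : (List (Int × Int) × List (Int × Int)) × Std.HashSet Int) (nh : Int)
    (h : nh ∉ st.2) :
    pvPushNew day st nh = (pvAppend st.1 (nh, day), st.2.insert nh) := by
  unfold pvPushNew
  rw [if_neg]
  intro hc
  exact h (Std.HashSet.contains_iff_mem.mp hc)

lemma pv_pop_step (N : Int) (fuel : Nat) (k : Nat) (a : Int) (A B : List Int)
    (q : List (Int × Int) × List (Int × Int)) (V : Std.HashSet Int)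
    (inv : PvInv N k (a :: A) B V)
    (hq : pvToList q
      = (a, (k : Int)) :: (A.map (fun x => (x, (k : Int))) ++ B.map (fun x => (x, (k : Int) + 1))))
    (hμ : (a :: A).length + (2 ^ (fN N.toNat + 1) - 2 ^ (k + 1)) ≤ fuel + 1)
    (IH : ∀ (k' : Nat) (A' B' : List Int) (q' : List (Int × Int) × List (Int × Int))
      (V' : Std.HashSet Int), PvInv N k' A' B' V' →
      pvToList q' = A'.map (fun x => (x, (k' : Int))) ++ B'.map (fun x => (x, (k' : Int) + 1)) →
      A'.length + (2 ^ (fN N.toNat + 1) - 2 ^ (k' + 1)) ≤ fuel →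
      pvLoopA N fuel q' V' = (fN N.toNat : Int)) :
    pvLoopA N (fuel + 1) q V = (fN N.toNat : Int) := by
  obtain ⟨ha1, hak⟩ := inv.hA a (List.mem_cons_self)
  obtain ⟨q', hpop, hq'⟩ := pvPopleft_cons q _ _ hq
  simp only [pvLoopA, hpop]
  by_cases haN : a = N
  · rw [if_pos haN]
    rw [haN] at hak
    exact_mod_cast congrArg (Nat.cast : Nat → Int) hak.symm
  · rw [if_neg haN]
    set day : Int := (k : Int) + 1 with hday
    have hstormy : PySem.Int.floordiv (a + a) 2 = a := by
      rw [PySem.Int.floordiv_eq_ediv_of_pos (by norm_num)]; omega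
    have haV : a ∈ V := (inv.hV a).mpr (Or.inl ⟨ha1, by omega⟩)
    have hs1 : (1 : Int) ≤ a + a := by omega
    have hsf : fN (a + a).toNat = k + 1 := by
      have ht : (a + a).toNat = 2 * a.toNat := by omega
      rw [ht, fN_double a.toNat (by omega)]
      omega
    have hsV : (a + a) ∈ V ↔ (a + a) ∈ B := by
      rw [inv.hV]
      constructor
      · rintro (⟨_, hle⟩ | h)
        · omega
        · exact h
      · exact Or.inr
    have hmu : A.length + (2 ^ (fN N.toNat + 1) - 2 ^ (k + 1)) ≤ fuel := by
      simp only [List.length_cons] at hμ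
      omega
    by_cases hsB : (a + a) ∈ B
    · -- sunny already visited
      have e1 : pvPushNew day (q', V) (a + a) = (q', V) :=
        pvPushNew_mem _ _ _ (hsV.mpr hsB)
      by_cases hcV : (max 1 (a - 1)) ∈ V
      · -- cloudy already visited: nothing is enqueued
        have e2 : pvPushNew day (q', V) (max 1 (a - 1)) = (q', V) :=
          pvPushNew_mem _ _ _ hcV
        have e3 : pvPushNew day (q', V) a = (q', V) := pvPushNew_mem _ _ _ haV
        simp only [List.foldl_cons, List.foldl_nil, e1, e2, e3, hstormy]
        have inv' : PvInv N k A (B ++ []) V := by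
          refine pv_inv_step N k a A B [] V V inv haN (by simp) List.nodup_nil
            (by simp) ?_
          intro h h1 hf hp
          left
          by_cases hhe : h % 2 = 0
          · unfold pvPar at hp
            rw [if_pos hhe] at hp
            have : h = a + a := by omega
            rw [this]
            exact hsB
          · unfold pvPar at hp
            rw [if_neg hhe] at hp
            have hha : h = a - 1 := by omega
            have ha2 : 2 ≤ a := by omega
            have hcVm : h ∈ V := by
              rw [hha, show a - 1 = max 1 (a - 1) by omega]
              exact hcV
            rcases (inv.hV h).mp hcVm with ⟨_, hle⟩ | hB
            · omega
            · exact hB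
        rw [List.append_nil] at inv'
        exact IH k A B q' V inv' hq' hmu
      · -- cloudy is new
        have ha2 : 2 ≤ a := by
          by_contra hc
          have : a = 1 := by omega
          apply hcV
          rw [this]
          simp only [show max (1 : Int) (1 - 1) = 1 by norm_num]
          exact (inv.hV 1).mpr (Or.inl ⟨le_refl 1, by simp [fN_of_le]⟩)
        have hcmax : max 1 (a - 1) = a - 1 := by omega
        rw [hcmax] at hcV
        have hc1 : (1 : Int) ≤ a - 1 := by omega
        have hcfle : fN (a - 1).toNat ≤ k + 1 := by
          have ht : (a - 1).toNat = a.toNat - 1 := by omega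
          have hstep := fN_le_succ (a.toNat - 1) (by omega)
          have ht2 : a.toNat - 1 + 1 = a.toNat := by omega
          rw [ht2] at hstep
          rw [ht]
          omega
        have hcf : fN (a - 1).toNat = k + 1 := by
          rcases Nat.lt_or_ge k (fN (a - 1).toNat) with h | h
          · omega
          · exact absurd ((inv.hV _).mpr (Or.inl ⟨hc1, h⟩)) hcV
        have hcB : (a - 1) ∉ B := fun h => hcV ((inv.hV _).mpr (Or.inr h))
        have e2 : pvPushNew day (q', V) (a - 1)
            = (pvAppend q' (a - 1, day), V.insert (a - 1)) :=
          pvPushNew_not_mem _ _ _ hcV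
        have e3 : pvPushNew day (pvAppend q' (a - 1, day), V.insert (a - 1)) a
            = (pvAppend q' (a - 1, day), V.insert (a - 1)) :=
          pvPushNew_mem _ _ _ (by rw [Std.HashSet.mem_insert]; exact Or.inr haV)
        simp only [List.foldl_cons, List.foldl_nil, e1, hcmax, e2, hstormy, e3]
        have inv' : PvInv N k A (B ++ [a - 1]) (V.insert (a - 1)) := by
          refine pv_inv_step N k a A B [a - 1] V _ inv haN ?_ (by simp) ?_ ?_
          · intro x hx
            simp only [List.mem_singleton] at hx
            subst hx
            exact ⟨hc1, hcf, hcB⟩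
          · intro h
            rw [Std.HashSet.mem_insert]
            simp only [beq_iff_eq, List.mem_singleton]
            constructor
            · rintro (rfl | hv)
              · exact Or.inr rfl
              · exact Or.inl hv
            · rintro (hv | rfl)
              · exact Or.inr hv
              · exact Or.inl rfl
          · intro h h1 hf hp
            by_cases hhe : h % 2 = 0
            · unfold pvPar at hp
              rw [if_pos hhe] at hp
              have : h = a + a := by omega
              rw [this]
              exact Or.inl hsB
            · unfold pvPar at hp
              rw [if_neg hhe] at hp
              have : h = a - 1 := by omega
              rw [this]
              exact Or.inr (List.mem_singleton.mpr rfl)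
        have htl : pvToList (pvAppend q' (a - 1, day))
            = A.map (fun x => (x, (k : Int)))
              ++ (B ++ [a - 1]).map (fun x => (x, (k : Int) + 1)) := by
          rw [pvToList_append, hq']
          simp [hday, List.map_append, List.append_assoc]
        exact IH k A (B ++ [a - 1]) _ _ inv' htl hmu
    · -- sunny is new
      have hsVn : (a + a) ∉ V := fun h => hsB (hsV.mp h)
      have e1 : pvPushNew day (q', V) (a + a)
          = (pvAppend q' (a + a, day), V.insert (a + a)) :=
        pvPushNew_not_mem _ _ _ hsVn
      have hane : a - 1 ≠ a + a := by omega
      by_cases hcV : (max 1 (a - 1)) ∈ V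
      · -- cloudy already visited
        have e2 : pvPushNew day (pvAppend q' (a + a, day), V.insert (a + a)) (max 1 (a - 1))
            = (pvAppend q' (a + a, day), V.insert (a + a)) :=
          pvPushNew_mem _ _ _ (by rw [Std.HashSet.mem_insert]; exact Or.inr hcV)
        have e3 : pvPushNew day (pvAppend q' (a + a, day), V.insert (a + a)) a
            = (pvAppend q' (a + a, day), V.insert (a + a)) :=
          pvPushNew_mem _ _ _ (by rw [Std.HashSet.mem_insert]; exact Or.inr haV)
        simp only [List.foldl_cons, List.foldl_nil, e1, e2, hstormy, e3]
        have inv' : PvInv N k A (B ++ [a + a]) (V.insert (a + a)) := by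
          refine pv_inv_step N k a A B [a + a] V _ inv haN ?_ (by simp) ?_ ?_
          · intro x hx
            simp only [List.mem_singleton] at hx
            subst hx
            exact ⟨hs1, hsf, hsB⟩
          · intro h
            rw [Std.HashSet.mem_insert]
            simp only [beq_iff_eq, List.mem_singleton]
            constructor
            · rintro (rfl | hv)
              · exact Or.inr rfl
              · exact Or.inl hv
            · rintro (hv | rfl)
              · exact Or.inr hv
              · exact Or.inl rfl
          · intro h h1 hf hp
            by_cases hhe : h % 2 = 0
            · unfold pvPar at hp
              rw [if_pos hhe] at hp
              have : h = a + a := by omega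
              rw [this]
              exact Or.inr (List.mem_singleton.mpr rfl)
            · unfold pvPar at hp
              rw [if_neg hhe] at hp
              have hha : h = a - 1 := by omega
              have ha2 : 2 ≤ a := by omega
              have hcVm : h ∈ V := by
                rw [hha, show a - 1 = max 1 (a - 1) by omega]
                exact hcV
              rcases (inv.hV h).mp hcVm with ⟨_, hle⟩ | hB
              · omega
              · exact Or.inl hB
        have htl : pvToList (pvAppend q' (a + a, day))
            = A.map (fun x => (x, (k : Int)))
              ++ (B ++ [a + a]).map (fun x => (x, (k : Int) + 1)) := by
          rw [pvToList_append, hq']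
          simp [hday, List.map_append, List.append_assoc]
        exact IH k A (B ++ [a + a]) _ _ inv' htl hmu
      · -- cloudy is new too
        have ha2 : 2 ≤ a := by
          by_contra hc
          have : a = 1 := by omega
          apply hcV
          rw [this]
          simp only [show max (1 : Int) (1 - 1) = 1 by norm_num]
          exact (inv.hV 1).mpr (Or.inl ⟨le_refl 1, by simp [fN_of_le]⟩)
        have hcmax : max 1 (a - 1) = a - 1 := by omega
        rw [hcmax] at hcV
        have hc1 : (1 : Int) ≤ a - 1 := by omega
        have hcfle : fN (a - 1).toNat ≤ k + 1 := by
          have ht : (a - 1).toNat = a.toNat - 1 := by omega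
          have hstep := fN_le_succ (a.toNat - 1) (by omega)
          have ht2 : a.toNat - 1 + 1 = a.toNat := by omega
          rw [ht2] at hstep
          rw [ht]
          omega
        have hcf : fN (a - 1).toNat = k + 1 := by
          rcases Nat.lt_or_ge k (fN (a - 1).toNat) with h | h
          · omega
          · exact absurd ((inv.hV _).mpr (Or.inl ⟨hc1, h⟩)) hcV
        have hcB : (a - 1) ∉ B := fun h => hcV ((inv.hV _).mpr (Or.inr h))
        have hcVn : (a - 1) ∉ V.insert (a + a) := by
          rw [Std.HashSet.mem_insert]
          rintro (heq | hv)
          · exact hane (by exact_mod_cast (beq_iff_eq.mp heq).symm)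
          · exact hcV hv
        have e2 : pvPushNew day (pvAppend q' (a + a, day), V.insert (a + a)) (a - 1)
            = (pvAppend (pvAppend q' (a + a, day)) (a - 1, day),
               (V.insert (a + a)).insert (a - 1)) :=
          pvPushNew_not_mem _ _ _ hcVn
        have e3 : pvPushNew day (pvAppend (pvAppend q' (a + a, day)) (a - 1, day),
              (V.insert (a + a)).insert (a - 1)) a
            = (pvAppend (pvAppend q' (a + a, day)) (a - 1, day),
               (V.insert (a + a)).insert (a - 1)) :=
          pvPushNew_mem _ _ _
            (by rw [Std.HashSet.mem_insert, Std.HashSet.mem_insert]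
                exact Or.inr (Or.inr haV))
        simp only [List.foldl_cons, List.foldl_nil, e1, hcmax, e2, hstormy, e3]
        have inv' : PvInv N k A (B ++ [a + a, a - 1])
            ((V.insert (a + a)).insert (a - 1)) := by
          refine pv_inv_step N k a A B [a + a, a - 1] V _ inv haN ?_
            (by simp [hane.symm]) ?_ ?_
          · intro x hx
            rcases List.mem_pair.mp hx with h | h
            · subst h; exact ⟨hs1, hsf, hsB⟩
            · subst h; exact ⟨hc1, hcf, hcB⟩
          · intro h
            rw [Std.HashSet.mem_insert, Std.HashSet.mem_insert]
            simp only [beq_iff_eq, List.mem_pair]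
            constructor
            · rintro (rfl | rfl | hv)
              · exact Or.inr (Or.inr rfl)
              · exact Or.inr (Or.inl rfl)
              · exact Or.inl hv
            · rintro (hv | rfl | rfl)
              · exact Or.inr (Or.inr hv)
              · exact Or.inr (Or.inl rfl)
              · exact Or.inl rfl
          · intro h h1 hf hp
            by_cases hhe : h % 2 = 0
            · unfold pvPar at hp
              rw [if_pos hhe] at hp
              have : h = a + a := by omega
              rw [this]
              exact Or.inr (by simp)
            · unfold pvPar at hp
              rw [if_neg hhe] at hp
              have : h = a - 1 := by omega
              rw [this]
              exact Or.inr (by simp)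
        have htl : pvToList (pvAppend (pvAppend q' (a + a, day)) (a - 1, day))
            = A.map (fun x => (x, (k : Int)))
              ++ (B ++ [a + a, a - 1]).map (fun x => (x, (k : Int) + 1)) := by
          rw [pvToList_append, pvToList_append, hq']
          simp [hday, List.map_append, List.append_assoc]
        exact IH k A (B ++ [a + a, a - 1]) _ _ inv' htl hmu

lemma pv_loop_ok (fuel : Nat) : ∀ (k : Nat) (A B : List Int)
    (q : List (Int × Int) × List (Int × Int)) (V : Std.HashSet Int) (N : Int),
    PvInv N k A B V →
    pvToList q = A.map (fun x => (x, (k : Int))) ++ B.map (fun x => (x, (k : Int) + 1)) →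
    A.length + (2 ^ (fN N.toNat + 1) - 2 ^ (k + 1)) ≤ fuel →
    pvLoopA N fuel q V = (fN N.toNat : Int) := by
  induction fuel with
  | zero =>
    intro k A B q V N inv htl hμ
    exfalso
    have hA0 : A.length = 0 := by omega
    have hpow : 2 ^ (fN N.toNat + 1) ≤ 2 ^ (k + 1) := by
      have := Nat.one_le_two_pow (n := k + 1)
      omega
    have hTk : fN N.toNat ≤ k := by
      have := (Nat.pow_le_pow_iff_right (by norm_num : 1 < 2)).mp hpow
      omega
    have hkT : k = fN N.toNat := le_antisymm inv.hk hTk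
    have hAnil : A = [] := List.length_eq_zero_iff.mp hA0
    rw [hAnil] at inv
    exact absurd (inv.hN hkT) (List.not_mem_nil)
  | succ fuel ih =>
    intro k A B q V N inv htl hμ
    cases A with
    | cons a A' =>
      refine pv_pop_step N fuel k a A' B q V inv ?_ hμ
        (fun k' A' B' q' V' => ih k' A' B' q' V' N)
      simpa only [List.map_cons, List.cons_append] using htl
    | nil =>
      obtain ⟨inv', hBne⟩ := pv_reindex N k B V inv
      cases B with
      | nil => exact absurd rfl hBne
      | cons b B₂ =>
        have hlen : (b :: B₂).length ≤ 2 ^ (k + 1) :=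
          pv_level_card (k + 1) (b :: B₂) inv'.nA inv'.hA
        have hμ' : (b :: B₂).length + (2 ^ (fN N.toNat + 1) - 2 ^ (k + 1 + 1)) ≤ fuel + 1 := by
          have hkT : k + 1 ≤ fN N.toNat := inv'.hk
          have e1 : 2 ^ (k + 1 + 1) = 2 * 2 ^ (k + 1) := by ring
          have e3 : 2 ^ (k + 1) ≤ 2 ^ (fN N.toNat + 1) :=
            Nat.pow_le_pow_right (by norm_num) (by omega)
          have e4 : 2 ^ (k + 1 + 1) ≤ 2 ^ (fN N.toNat + 1) :=
            Nat.pow_le_pow_right (by norm_num) (by omega)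
          simp only [List.length_nil] at hμ
          omega
        refine pv_pop_step N fuel (k + 1) b B₂ [] q V inv' ?_ hμ'
          (fun k' A' B' q' V' => ih k' A' B' q' V' N)
        rw [htl]
        have hcast : (((k + 1 : Nat) : Int)) = (k : Int) + 1 := by push_cast; ring
        simp only [List.map_nil, List.nil_append, List.append_nil, List.map_cons, hcast]

lemma pv_alt_eq (n : Int) (d : Int) : pvLoopB n d = d + (fN n.toNat : Int) := by
  induction n, d using pvLoopB.induct with
  | case1 n d h1 hmod ih =>
    rw [pvLoopB, dif_pos h1, if_pos hmod]
    rw [PySem.Int.mod_eq_emod_of_pos (by norm_num)] at hmod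
    rw [PySem.Int.floordiv_eq_ediv_of_pos (by norm_num)] at ih ⊢
    rw [ih]
    have ht : (n / 2).toNat = n.toNat / 2 := by omega
    have hf : fN n.toNat = 1 + fN (n.toNat / 2) := fN_even n.toNat (by omega) (by omega)
    rw [ht, hf]
    push_cast
    ring
  | case2 n d h1 hmod ih =>
    rw [pvLoopB, dif_pos h1, if_neg hmod]
    rw [PySem.Int.mod_eq_emod_of_pos (by norm_num)] at hmod
    rw [PySem.Int.floordiv_eq_ediv_of_pos (by norm_num)] at ih ⊢
    rw [ih]
    have ht : ((n + 1) / 2).toNat = (n.toNat + 1) / 2 := by omega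
    have hf : fN n.toNat = 2 + fN ((n.toNat + 1) / 2) := fN_odd n.toNat (by omega) (by omega)
    rw [ht, hf]
    push_cast
    ring
  | case3 n d h1 =>
    rw [pvLoopB, dif_neg h1]
    have : n.toNat ≤ 1 := by omega
    rw [fN_of_le n.toNat this]
    simp

-- ===== VERDICT (by name: the statement is the Claim_ definition above) =====
theorem bfs_to_reach_height_spec : Claim_equal_bfs_to_reach_height := by
  intro N hdom hpre
  have hpre' : (1 : Int) ≤ N := hpre
  unfold Spec_bfs_to_reach_height
  rw [bfs_to_reach_height_alt, pv_alt_eq N 0]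
  have inv0 : PvInv N 0 [(1 : Int)] [] ((∅ : Std.HashSet Int).insert 1) := by
    refine ⟨?_, by simp, ?_, ?_, by simp, List.nodup_nil, by omega, ?_⟩
    · intro a ha
      have : a = 1 := by simpa using ha
      subst this
      exact ⟨le_refl 1, by simp [fN_of_le]⟩
    · intro h
      rw [Std.HashSet.mem_insert]
      simp only [beq_iff_eq, Std.HashSet.not_mem_empty, or_false, List.not_mem_nil]
      constructor
      · rintro rfl
        exact ⟨le_refl 1, by simp [fN_of_le]⟩
      · rintro ⟨h1, hle⟩
        have h0 : fN h.toNat = 0 := by omega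
        rw [fN_eq_zero_iff] at h0
        omega
    · intro h h1 hf
      right
      have h2 : h.toNat = 2 := (fN_eq_one_iff h.toNat).mp hf
      have : h = 2 := by omega
      subst this
      simp [pvPar]
    · intro h0
      have : fN N.toNat = 0 := h0.symm
      rw [fN_eq_zero_iff] at this
      have : N = 1 := by omega
      simp [this]
  have htl0 : pvToList ([((1 : Int), (0 : Int))], [])
      = [(1 : Int)].map (fun x => (x, ((0 : Nat) : Int)))
        ++ ([] : List Int).map (fun x => (x, ((0 : Nat) : Int) + 1)) := by
    simp [pvToList]
  have hμ0 : ([(1 : Int)].length + (2 ^ (fN N.toNat + 1) - 2 ^ (0 + 1)))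
      ≤ 2 ^ (2 * Nat.log 2 (N.toNat + 1) + 4) := by
    have hT : fN N.toNat ≤ 2 * Nat.log 2 N.toNat + 2 := fN_le_log N.toNat (by omega)
    have hmono : Nat.log 2 N.toNat ≤ Nat.log 2 (N.toNat + 1) := Nat.log_mono_right (by omega)
    have h1 : 2 ^ (fN N.toNat + 1) ≤ 2 ^ (2 * Nat.log 2 (N.toNat + 1) + 3) :=
      Nat.pow_le_pow_right (by norm_num) (by omega)
    have h2 : 2 ^ (2 * Nat.log 2 (N.toNat + 1) + 4)
        = 2 * 2 ^ (2 * Nat.log 2 (N.toNat + 1) + 3) := by ring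
    have h3 := Nat.one_le_two_pow (n := 2 * Nat.log 2 (N.toNat + 1) + 3)
    simp only [List.length_singleton]
    omega
  have hmain := pv_loop_ok (2 ^ (2 * Nat.log 2 (N.toNat + 1) + 4)) 0 [(1 : Int)] []
    ([((1 : Int), (0 : Int))], []) ((∅ : Std.HashSet Int).insert 1) N inv0 htl0 hμ0
  rw [bfs_to_reach_height]
  rw [hmain]
  ring
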